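-- pv_equiv track=rewrite | github.com/haoxiang-xu/PuPu | unchain_runtime/server/route_projection.py | _normalize_cluster_labels
-- ===== SOURCE A (Python) =====
-- from typing import Any, Dict, List
--
-- def _normalize_cluster_labels(raw_labels: object, point_count: int) -> List[int]:
--     if point_count <= 0:
--         return []
--
--     candidate = raw_labels
--     if hasattr(candidate, "tolist"):
--         try:
--             candidate = candidate.tolist()
--         except Exception:
--             candidate = []
--
--     normalized: List[int] = []
--     if isinstance(candidate, list):
--         for item in candidate:
--             try:
--                 normalized.append(max(0, int(item)))
--             except Exception:
--                 normalized.append(0)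
--
--     if len(normalized) < point_count:
--         normalized.extend([0] * (point_count - len(normalized)))
--
--     return normalized[:point_count]
-- ===== SOURCE B (Python) =====
-- def _normalize_cluster_labels(raw_labels, point_count):
--     if point_count <= 0:
--         return []
--     candidate = raw_labels
--     if hasattr(candidate, "tolist"):
--         try:
--             candidate = candidate.tolist()
--         except Exception:
--             candidate = []
--     source = candidate if isinstance(candidate, list) else []
--     result = []
--     for i in range(point_count):
--         if i < len(source):
--             try:
--                 v = max(0, int(source[i]))
--             except Exception:
--                 v = 0
--         else:
--             v = 0
--         result.append(v)
--     return result
-- ===== Notes on version B (the rewrite author's own statement) =====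
-- stated objective: simpler
-- what changed: Instead of mapping all items, then padding with zeros and truncating by a slice, B builds the fixed-length output directly in one position-driven pass over range(point_count), emitting the clamped source value when the index is in range and 0 otherwise.
import Mathlib
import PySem

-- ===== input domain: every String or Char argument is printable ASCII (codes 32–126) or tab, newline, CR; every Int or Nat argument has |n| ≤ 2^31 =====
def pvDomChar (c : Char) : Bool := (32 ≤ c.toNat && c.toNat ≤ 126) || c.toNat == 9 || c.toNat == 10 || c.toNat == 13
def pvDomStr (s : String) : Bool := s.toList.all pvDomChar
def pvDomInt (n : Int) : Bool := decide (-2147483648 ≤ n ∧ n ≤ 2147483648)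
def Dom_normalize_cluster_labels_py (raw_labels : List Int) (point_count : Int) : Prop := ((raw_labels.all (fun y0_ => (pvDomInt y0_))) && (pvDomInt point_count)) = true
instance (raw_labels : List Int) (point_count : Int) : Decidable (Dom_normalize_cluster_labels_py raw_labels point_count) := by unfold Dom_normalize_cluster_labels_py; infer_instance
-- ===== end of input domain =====

-- B builds the fixed-length result in one position-driven pass instead of map+pad+slice (objective: simpler).


-- ===== PORT A =====
-- raw_labels : List Int, so the tolist / isinstance(list) coercion is the identity and
-- int(item) never raises; max(0, int(item)) is max 0 item.
def normalize_cluster_labels_py (raw_labels : List Int) (point_count : Int) : List Int :=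
  if point_count ≤ 0 then []
  else
    let normalized := raw_labels.map (fun item => max 0 item)
    let normalized :=
      if (normalized.length : Int) < point_count then
        normalized ++ List.replicate (point_count - (normalized.length : Int)).toNat 0
      else normalized
    -- normalized[:point_count] with point_count > 0: exact as take
    normalized.take point_count.toNat

-- ===== PORT B =====
def normalize_cluster_labels_py_alt (raw_labels : List Int) (point_count : Int) : List Int :=
  if point_count ≤ 0 then []
  else
    -- range(point_count) with point_count > 0: exact as List.range point_count.toNat
    (List.range point_count.toNat).map (fun i =>
      if i < raw_labels.length then max 0 (raw_labels.getD i 0) else 0)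

-- ===== PRECONDITION & SPEC =====
def Spec_normalize_cluster_labels_py (raw_labels : List Int) (point_count : Int) (out : List Int) : Prop := out = normalize_cluster_labels_py_alt raw_labels point_count
instance (raw_labels : List Int) (point_count : Int) (out : List Int) : Decidable (Spec_normalize_cluster_labels_py raw_labels point_count out) := by unfold Spec_normalize_cluster_labels_py; infer_instance

-- ===== CLAIM (what is proved, stated in full; the proofs are below) =====
def Claim_equal_normalize_cluster_labels_py : Prop := ∀ (raw_labels : List Int) (point_count : Int), Dom_normalize_cluster_labels_py raw_labels point_count → Spec_normalize_cluster_labels_py raw_labels point_count (normalize_cluster_labels_py raw_labels point_count)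

-- ===== LEMMAS AND PROOFS =====

-- map + pad-with-zeros + take n equals the position-driven construction.
theorem pad_take_eq_range_map (l : List Int) (n : Nat) :
    ((l.map (fun item => max 0 item)) ++ List.replicate (n - l.length) 0).take n
      = (List.range n).map (fun i => if i < l.length then max 0 (l.getD i 0) else 0) := by
  apply List.ext_getElem
  · simp [Nat.min_def]; omega
  · intro i h1 h2
    simp only [List.getElem_take, List.getElem_map, List.getElem_range]
    by_cases hi : i < l.length
    · rw [List.getElem_append_left (by simpa using hi)]
      simp [hi, List.getD_eq_getElem?_getD]
    · rw [List.getElem_append_right (by simpa using hi)]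
      simp [hi]

theorem normalize_cluster_labels_py_spec : Claim_equal_normalize_cluster_labels_py := by
  intro raw_labels point_count _
  unfold Spec_normalize_cluster_labels_py normalize_cluster_labels_py normalize_cluster_labels_py_alt
  by_cases hle : point_count ≤ 0
  · simp [hle]
  · simp only [hle, if_false]
    have hpos : 0 < point_count := lt_of_not_ge hle
    by_cases hlt : ((raw_labels.map (fun item => max 0 item)).length : Int) < point_count
    · simp only [hlt, if_true]
      have : (point_count - ((raw_labels.map (fun item => max 0 item)).length : Int)).toNat
          = point_count.toNat - raw_labels.length := by
        simp only [List.length_map]; omega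
      rw [this]
      simpa using pad_take_eq_range_map raw_labels point_count.toNat
    · simp only [hlt, if_false]
      have hge : point_count.toNat - raw_labels.length = 0 := by
        simp only [List.length_map] at hlt; omega
      have := pad_take_eq_range_map raw_labels point_count.toNat
      rw [hge] at this
      simpa using this

-- ===== VERDICT (by name: the statement is the Claim_ definition above) =====
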